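-- pv_equiv track=rewrite | github.com/unie2/PythonCodingTest-Practice | 프로그래머스/Level.2/[3차] 방금그곡.py | solution
-- ===== SOURCE A (Python) =====
-- def replacement(data) :
--     data = data.replace('C#', 'c')
--     data = data.replace('D#', 'd')
--     data = data.replace('F#', 'f')
--     data = data.replace('G#', 'g')
--     data = data.replace('A#', 'a')
--
--     return data
--
-- def solution(m, musicinfos) :
--     answer = ''
--     m = replacement(m)
--
--     max_time = 0
--     for music in musicinfos :
--         start, end, name, info = music.split(",")
--         info = replacement(info)
--
--         play_time = (int(end[:2]) - int(start[:2])) * 60 + (int(end[3:]) - int(start[3:]))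
--         index = 0
--         value = ''
--         time = play_time
--         while time :
--             value += info[index]
--             if index + 1 == len(info) :
--                 index = -1
--             index += 1
--             time -= 1
--
--         if m in value :
--             if answer :
--                 if max_time >= play_time :
--                     continue
--             max_time = play_time
--             answer = name
--
--     if answer :
--         return answer
--     else :
--         return '(None)'
-- ===== SOURCE B (Python) =====
-- def replacement(data):
--     data = data.replace('C#', 'c')
--     data = data.replace('D#', 'd')
--     data = data.replace('F#', 'f')
--     data = data.replace('G#', 'g')
--     data = data.replace('A#', 'a')
--     return data
--
--
-- def _minutes(t):
--     return int(t[:2]) * 60 + int(t[3:])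
--
--
-- def solution(m, musicinfos):
--     m = replacement(m)
--     best_name = None
--     best_time = -1
--     for music in musicinfos:
--         start, end, name, info = music.split(",")
--         info = replacement(info)
--         play_time = _minutes(end) - _minutes(start)
--         q, r = divmod(play_time, len(info))
--         value = info * q + info[:r]
--         if m in value and play_time > best_time:
--             best_name, best_time = name, play_time
--     return best_name if best_name is not None else '(None)'
-- ===== Notes on version B (the rewrite author's own statement) =====
-- stated objective: alternative
-- what changed: The char-by-char while-loop that cycles an index to build the played melody is replaced by a closed-form divmod repetition (info * q + info[:r]), and the ''-sentinel answer/max_time bookkeeping is replaced by an Option best_name with best_time initialized to -1 and a single play_time > best_time test.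
-- outside the precondition, e.g. on solution('', ['00:00,00:01,,x']): A returns '(None)', B returns ''; on solution('x', ['10:00,10:00,song,']): A returns '(None)', B raises ZeroDivisionError
import Mathlib
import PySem

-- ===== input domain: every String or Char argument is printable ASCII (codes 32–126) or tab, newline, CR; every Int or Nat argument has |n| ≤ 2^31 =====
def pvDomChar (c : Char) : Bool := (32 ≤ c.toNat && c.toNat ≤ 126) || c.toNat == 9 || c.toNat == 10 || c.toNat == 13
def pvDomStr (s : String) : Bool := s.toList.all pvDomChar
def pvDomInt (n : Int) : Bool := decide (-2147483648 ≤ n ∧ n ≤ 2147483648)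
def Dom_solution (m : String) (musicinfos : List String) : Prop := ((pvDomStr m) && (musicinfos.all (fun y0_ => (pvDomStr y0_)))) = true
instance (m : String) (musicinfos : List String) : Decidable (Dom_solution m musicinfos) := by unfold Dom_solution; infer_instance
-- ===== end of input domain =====

-- B replaces A's char-by-char cyclic while-loop by a closed-form divmod repetition and A's ''-sentinel
-- best-match bookkeeping by an Option/best_time pair; equivalence is proved on Pre_ (well-formed records).

-- ===== PORT A =====
-- replacement(data): the five chained .replace calls (identical helper in A and B)
def pvRepl (s : List Char) : List Char :=
  let s := PySem.Chars.replace s ['C', '#'] ['c']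
  let s := PySem.Chars.replace s ['D', '#'] ['d']
  let s := PySem.Chars.replace s ['F', '#'] ['f']
  let s := PySem.Chars.replace s ['G', '#'] ['g']
  PySem.Chars.replace s ['A', '#'] ['a']

-- A's 'while time:' loop; fuel = play_time.toNat (faithful for play_time ≥ 0, which Pre_ requires:
-- Python diverges for negative play_time).  (pyGet? … ).toList is [info[index]]; none (Python
-- IndexError, empty info) only occurs outside Pre_.
def pvALoop (info : List Char) : Nat → Int → List Char → List Char
  | 0, _index, value => value
  | t + 1, index, value =>
    let value := value ++ (PySem.List.pyGet? info index).toList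
    let index := if index + 1 = (info.length : Int) then (-1 : Int) else index
    pvALoop info t (index + 1) value

-- one iteration of A's 'for music in musicinfos'; state = (answer, max_time).
-- Python raises ValueError on a record that does not split into 4 fields or whose time slices do
-- not parse as int (both outside Pre_); the port keeps the state there for totality.
def pvAStep (m : List Char) (st : List Char × Int) (music : String) : List Char × Int :=
  match PySem.Chars.splitOn music.toList [','] with
  | [start, end_, name, info] =>
    let info := pvRepl info
    match PySem.Int.ofChars? (PySem.Chars.slice end_ none (some 2)),
          PySem.Int.ofChars? (PySem.Chars.slice start none (some 2)),
          PySem.Int.ofChars? (PySem.Chars.slice end_ (some 3) none),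
          PySem.Int.ofChars? (PySem.Chars.slice start (some 3) none) with
    | some e1, some s1, some e2, some s2 =>
      let play_time := (e1 - s1) * 60 + (e2 - s2)
      let value := pvALoop info play_time.toNat 0 []
      if PySem.Chars.isIn m value then
        if st.1 ≠ [] ∧ st.2 ≥ play_time then st   -- 'if answer: if max_time >= play_time: continue'
        else (name, play_time)
      else st
    | _, _, _, _ => st
  | _ => st

def solution (m : String) (musicinfos : List String) : String :=
  let m' := pvRepl m.toList
  let st := musicinfos.foldl (pvAStep m') ([], 0)
  if st.1 ≠ [] then String.ofList st.1 else "(None)"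

-- ===== PORT B =====
-- _minutes(t) = int(t[:2]) * 60 + int(t[3:])
def pvMinutes? (t : List Char) : Option Int :=
  match PySem.Int.ofChars? (PySem.Chars.slice t none (some 2)),
        PySem.Int.ofChars? (PySem.Chars.slice t (some 3) none) with
  | some h, some mm => some (h * 60 + mm)
  | _, _ => none

-- one iteration of B's loop; state = (best_name, best_time); divmod raises ZeroDivisionError on an
-- empty normalized melody (outside Pre_); the port keeps the state on any raising record.
def pvBStep (m : List Char) (st : Option (List Char) × Int) (music : String) :
    Option (List Char) × Int :=
  match PySem.Chars.splitOn music.toList [','] with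
  | [start, end_, name, info] =>
    let info := pvRepl info
    match pvMinutes? end_, pvMinutes? start with
    | some em, some sm =>
      let play_time := em - sm
      match PySem.Int.divmod? play_time (info.length : Int) with
      | some (q, r) =>
        let value := PySem.List.pyRepeat info q ++ PySem.Chars.slice info none (some r)
        if PySem.Chars.isIn m value && decide (play_time > st.2) then (some name, play_time) else st
      | none => st
    | _, _ => st
  | _ => st

def solution_alt (m : String) (musicinfos : List String) : String :=
  let m' := pvRepl m.toList
  let st := musicinfos.foldl (pvBStep m') (none, -1)
  match st.1 with
  | some n => String.ofList n
  | none => "(None)"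

-- ===== PRECONDITION & SPEC =====
-- Pre_ admits the records A processes without raising or diverging: exactly 4 comma fields, the
-- four time slices parse as int, play_time ≥ 0 (A loops forever on negative play_time), and the
-- normalized melody is nonempty (A raises IndexError when play_time > 0; when play_time = 0 A
-- returns but B's divmod raises, a degenerate empty-melody record we exclude).  It also excludes
-- records with an empty name field, on which A's ''-sentinel conflates a found match with
-- 'no match yet' — an accidental corner where B's answer ('') is as defensible as A's.
def pvPreRec (music : String) : Bool :=
  match PySem.Chars.splitOn music.toList [','] with
  | [start, end_, name, info] =>
    let e1? := PySem.Int.ofChars? (PySem.Chars.slice end_ none (some 2))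
    let s1? := PySem.Int.ofChars? (PySem.Chars.slice start none (some 2))
    let e2? := PySem.Int.ofChars? (PySem.Chars.slice end_ (some 3) none)
    let s2? := PySem.Int.ofChars? (PySem.Chars.slice start (some 3) none)
    e1?.isSome && s1?.isSome && e2?.isSome && s2?.isSome &&
      decide (0 ≤ (e1?.getD 0 - s1?.getD 0) * 60 + (e2?.getD 0 - s2?.getD 0)) &&
      !name.isEmpty && !(pvRepl info).isEmpty
  | _ => false

def Pre_solution (m : String) (musicinfos : List String) : Prop :=
  musicinfos.all pvPreRec = true

instance (m : String) (musicinfos : List String) : Decidable (Pre_solution m musicinfos) := by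
  unfold Pre_solution; infer_instance

def pvWitness_solution : String × List String := ("AC#", ["00:00,00:03,HELLO,A#CE"])

def Spec_solution (m : String) (musicinfos : List String) (out : String) : Prop :=
  out = solution_alt m musicinfos

instance (m : String) (musicinfos : List String) (out : String) :
    Decidable (Spec_solution m musicinfos out) := by unfold Spec_solution; infer_instance

-- ===== CLAIM (what is proved, stated in full; the proofs are below) =====
def Claim_equal_solution : Prop := ∀ (m : String) (musicinfos : List String),
  Dom_solution m musicinfos → Pre_solution m musicinfos →
  Spec_solution m musicinfos (solution m musicinfos)

-- ===== LEMMAS AND PROOFS =====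

-- the accumulator of A's while-loop threads through
theorem pvALoop_acc (info : List Char) (n : Nat) :
    ∀ (i : Int) (v : List Char), pvALoop info n i v = v ++ pvALoop info n i [] := by
  induction n with
  | zero => intro i v; simp [pvALoop]
  | succ t ih =>
    intro i v
    simp only [pvALoop]
    rw [ih _ (v ++ _), ih _ ([] ++ _)]
    simp [List.append_assoc]

-- A's cyclic loop, characterized by the index formula
theorem pvALoop_map (info : List Char) (n : Nat) :
    ∀ i : Nat, i < info.length →
      pvALoop info n (i : Int) [] =
        (List.range n).map (fun k => info.getD ((i + k) % info.length) ' ') := by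
  induction n with
  | zero => intro i hi; simp [pvALoop]
  | succ t ih =>
    intro i hi
    simp only [pvALoop]
    rw [pvALoop_acc]
    have hget : PySem.List.pyGet? info (i : Int) = some (info.getD i ' ') := by
      simp [PySem.List.pyGet?, PySem.List.pyIdx?, hi, List.getD_eq_getElem?_getD]
    rw [List.range_succ_eq_map, hget]
    simp only [List.map_cons, List.map_map, Option.toList_some, List.nil_append,
      List.singleton_append]
    have hf0 : info.getD ((i + 0) % info.length) ' ' = info.getD i ' ' := by
      rw [Nat.add_zero, Nat.mod_eq_of_lt hi]
    rw [hf0]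
    congr 1
    by_cases hc : (i : Int) + 1 = (info.length : Int)
    · rw [if_pos hc]
      have hlen : i + 1 = info.length := by exact_mod_cast hc
      rw [show ((-1 : Int) + 1) = ((0 : Nat) : Int) by norm_num]
      rw [ih 0 (by omega)]
      apply List.map_congr_left
      intro k _
      simp only [Function.comp]
      congr 1
      rw [Nat.zero_add, show i + k.succ = info.length + k by omega, Nat.add_mod_left]
    · rw [if_neg hc]
      have hlt : i + 1 < info.length := by
        have : i + 1 ≠ info.length := by intro hh; exact hc (by exact_mod_cast hh)
        omega
      rw [show ((i : Int) + 1) = (((i + 1 : Nat)) : Int) by push_cast; ring]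
      rw [ih (i + 1) hlt]
      apply List.map_congr_left
      intro k _
      simp only [Function.comp]
      congr 2
      omega

-- the index formula is the closed-form repetition
theorem rangeMap_cycle (info : List Char) (q r : Nat)
    (hr : r ≤ info.length) :
    (List.range (q * info.length + r)).map (fun k => info.getD (k % info.length) ' ') =
      (List.replicate q info).flatten ++ info.take r := by
  induction q with
  | zero =>
    simp only [Nat.zero_mul, Nat.zero_add, List.replicate_zero, List.flatten_nil,
      List.nil_append]
    apply List.ext_getElem
    · simp [Nat.min_eq_left hr]
    · intro k hk1 hk2
      simp only [List.getElem_map, List.getElem_range, List.getElem_take]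
      have hk : k < r := by simpa using hk1
      rw [Nat.mod_eq_of_lt (by omega)]
      rw [List.getD_eq_getElem]
  | succ q ih =>
    have hsplit : (q + 1) * info.length + r = info.length + (q * info.length + r) := by ring
    rw [hsplit, List.range_add, List.map_append, List.map_map]
    have h1 : (List.range info.length).map (fun k => info.getD (k % info.length) ' ') = info := by
      apply List.ext_getElem
      · simp
      · intro k hk1 hk2
        simp only [List.getElem_map, List.getElem_range]
        rw [Nat.mod_eq_of_lt (by simpa using hk1), List.getD_eq_getElem]
    have h2 : ((List.range (q * info.length + r)).map
        ((fun k => info.getD (k % info.length) ' ') ∘ (fun j => info.length + j))) =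
        (List.range (q * info.length + r)).map (fun k => info.getD (k % info.length) ' ') := by
      apply List.map_congr_left
      intro k _
      simp [Function.comp, Nat.add_mod_left]
    rw [h1, h2, ih]
    simp [List.replicate_succ, List.append_assoc]

theorem fdiv_natCast (m k : Nat) : ((m : Int)).fdiv (k : Int) = ((m / k : Nat) : Int) := by
  have := PySem.Int.floordiv_natCast m k
  simpa [PySem.Int.floordiv] using this

theorem fmod_natCast (m k : Nat) : ((m : Int)).fmod (k : Int) = ((m % k : Nat) : Int) := by
  have := PySem.Int.mod_natCast m k
  simpa [PySem.Int.mod] using this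

-- A's value = B's value, for nonempty info and play_time = n ≥ 0
theorem pvValue_eq (info : List Char) (h : info ≠ []) (n : Nat) :
    pvALoop info n 0 [] =
      PySem.List.pyRepeat info (((n : Int)).fdiv (info.length : Int)) ++
        PySem.Chars.slice info none (some (((n : Int)).fmod (info.length : Int))) := by
  have hL : 0 < info.length := List.length_pos_iff.mpr h
  have h0 : (0 : Int) = ((0 : Nat) : Int) := rfl
  rw [h0, pvALoop_map info n 0 hL]
  simp only [Nat.zero_add]
  obtain ⟨q, r, hn, hrlt⟩ : ∃ q r, n = q * info.length + r ∧ r < info.length :=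
    ⟨n / info.length, n % info.length,
      by rw [Nat.mul_comm]; exact (Nat.div_add_mod n _).symm, Nat.mod_lt n hL⟩
  subst hn
  have hdiv : (q * info.length + r) / info.length = q := by
    rw [Nat.mul_comm q, Nat.mul_add_div hL, Nat.div_eq_of_lt hrlt, Nat.add_zero]
  have hmod : (q * info.length + r) % info.length = r := by
    rw [Nat.mul_comm q, Nat.mul_add_mod, Nat.mod_eq_of_lt hrlt]
  rw [rangeMap_cycle info _ _ (le_of_lt hrlt)]
  rw [fdiv_natCast, fmod_natCast, hdiv, hmod]
  simp [PySem.List.pyRepeat, PySem.Chars.slice, PySem.List.slice_to_natCast]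

-- the relation between A's (answer, max_time) and B's (best_name, best_time)
def pvRel (stA : List Char × Int) (stB : Option (List Char) × Int) : Prop :=
  (stA.1 = [] ∧ stB.1 = none ∧ stA.2 = 0 ∧ stB.2 = -1) ∨
  (stA.1 ≠ [] ∧ stB.1 = some stA.1 ∧ stB.2 = stA.2 ∧ 0 ≤ stA.2)

theorem pvStep_rel (m : List Char) (music : String) (hpre : pvPreRec music = true)
    (stA : List Char × Int) (stB : Option (List Char) × Int) (hrel : pvRel stA stB) :
    pvRel (pvAStep m stA music) (pvBStep m stB music) := by
  unfold pvPreRec at hpre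
  unfold pvAStep pvBStep
  rcases hsplit : PySem.Chars.splitOn music.toList [','] with
    _ | ⟨start, _ | ⟨end_, _ | ⟨name, _ | ⟨info, _ | ⟨x, rest⟩⟩⟩⟩⟩
  · exfalso; rw [hsplit] at hpre; simp at hpre
  · exfalso; rw [hsplit] at hpre; simp at hpre
  · exfalso; rw [hsplit] at hpre; simp at hpre
  · exfalso; rw [hsplit] at hpre; simp at hpre
  · -- the 4-field case
    rw [hsplit] at hpre
    simp only [Bool.and_eq_true, Option.isSome_iff_exists, decide_eq_true_eq,
      Bool.not_eq_true', List.isEmpty_eq_false_iff] at hpre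
    obtain ⟨⟨⟨⟨⟨⟨⟨e1, he1⟩, ⟨s1, hs1⟩⟩, ⟨e2, he2⟩⟩, ⟨s2, hs2⟩⟩, hpt⟩, hname⟩, hinfo⟩ := hpre
    rw [he1, hs1, he2, hs2] at hpt
    simp only [Option.getD_some] at hpt
    dsimp only
    rw [he1, hs1, he2, hs2]
    have hmin_end : pvMinutes? end_ = some (e1 * 60 + e2) := by
      unfold pvMinutes?; rw [he1, he2]
    have hmin_start : pvMinutes? start = some (s1 * 60 + s2) := by
      unfold pvMinutes?; rw [hs1, hs2]
    rw [hmin_end, hmin_start]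
    simp only []
    have hptB : e1 * 60 + e2 - (s1 * 60 + s2) = (e1 - s1) * 60 + (e2 - s2) := by ring
    rw [hptB]
    set L := (pvRepl info).length with hLdef
    have hLne : L ≠ 0 := by
      simpa [hLdef, List.length_eq_zero_iff] using hinfo
    have hL0 : (L : Int) ≠ 0 := by exact_mod_cast hLne
    have hdm : PySem.Int.divmod? ((e1 - s1) * 60 + (e2 - s2)) (L : Int) =
        some (((e1 - s1) * 60 + (e2 - s2)).fdiv L, ((e1 - s1) * 60 + (e2 - s2)).fmod L) := by
      simp [PySem.Int.divmod?, hLne]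
    rw [hdm]
    dsimp only
    have hn : ((e1 - s1) * 60 + (e2 - s2)) = ((((e1 - s1) * 60 + (e2 - s2)).toNat : Nat) : Int) :=
      (Int.toNat_of_nonneg hpt).symm
    have hval : pvALoop (pvRepl info) ((e1 - s1) * 60 + (e2 - s2)).toNat 0 [] =
        PySem.List.pyRepeat (pvRepl info) (((e1 - s1) * 60 + (e2 - s2)).fdiv (L : Int)) ++
          PySem.Chars.slice (pvRepl info) none (some (((e1 - s1) * 60 + (e2 - s2)).fmod (L : Int))) := by
      rw [pvValue_eq (pvRepl info) hinfo]
      rw [← hLdef, ← hn]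
    rw [← hval]
    set pt := (e1 - s1) * 60 + (e2 - s2) with hptdef
    set v := pvALoop (pvRepl info) pt.toNat 0 [] with hvdef
    by_cases hin : PySem.Chars.isIn m v = true
    · rw [if_pos hin]
      rcases hrel with ⟨ha, hb, hma, hmb⟩ | ⟨ha, hb, hmx, hnn⟩
      · -- no answer yet on either side
        rw [if_neg (by simp [ha])]
        have : (PySem.Chars.isIn m v && decide (pt > stB.2)) = true := by
          simp [hin, hmb]; omega
        rw [if_pos this]
        exact Or.inr ⟨hname, rfl, rfl, hpt⟩
      · -- both sides hold (answer, max_time = best_time)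
        by_cases hge : stA.2 ≥ pt
        · rw [if_pos ⟨ha, hge⟩]
          have : (PySem.Chars.isIn m v && decide (pt > stB.2)) = false := by
            simp [hmx]; omega
          rw [if_neg (by simp [this])]
          exact Or.inr ⟨ha, hb, hmx, hnn⟩
        · rw [if_neg (by tauto)]
          have : (PySem.Chars.isIn m v && decide (pt > stB.2)) = true := by
            simp [hin, hmx]; omega
          rw [if_pos this]
          exact Or.inr ⟨hname, rfl, rfl, hpt⟩
    · rw [if_neg hin]
      have hfalse : PySem.Chars.isIn m v = false := by simpa using hin
      rw [if_neg (by simp [hfalse])]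
      exact hrel
  · exfalso; rw [hsplit] at hpre; simp at hpre

theorem pvFold_rel (m : List Char) (musics : List String)
    (hpre : musics.all pvPreRec = true)
    (stA : List Char × Int) (stB : Option (List Char) × Int) (hrel : pvRel stA stB) :
    pvRel (musics.foldl (pvAStep m) stA) (musics.foldl (pvBStep m) stB) := by
  induction musics generalizing stA stB with
  | nil => exact hrel
  | cons music rest ih =>
    simp only [List.all_cons, Bool.and_eq_true] at hpre
    exact ih hpre.2 _ _ (pvStep_rel m music hpre.1 stA stB hrel)

-- ===== VERDICT (by name: the statement is the Claim_ definition above) =====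
theorem solution_spec : Claim_equal_solution := by
  intro m musicinfos _hdom hpre
  unfold Spec_solution solution solution_alt
  have h := pvFold_rel (pvRepl m.toList) musicinfos hpre ([], 0) (none, -1) (Or.inl ⟨rfl, rfl, rfl, rfl⟩)
  rcases h with ⟨h1, h2, _, _⟩ | ⟨h1, h2, _, _⟩
  · simp [h1, h2]
  · simp [h1, h2]
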